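-- pv_equiv track=rewrite | github.com/kharper2/DSA | as1.py | pyramidArt
-- ===== SOURCE A (Python) =====
-- def pyramidArt(x: str):
--     st = ""
--     n = len(x)
--     for i in range(n):
--         half1 = x[n - 1 - i: n]
--         half2 = x[n: n - i - 1: -1]
--         half = half2 + half1
--         half = ".".join(half)
--         st += half.center(4 * n - 3, ".")
--         if i != n - 1:
--             st += "\n"
--
--     st += "\n"
--
--     for i in range(n - 1):
--         half1 = x[i + 1: n]
--         half2 = x[n - 1: i + 1: -1]
--         half = half2 + half1
--         half = ".".join(half)
--         st += half.center(4 * n - 3, ".")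
--         if i != n - 1:
--             st += "\n"
--     return st
-- ===== SOURCE B (Python) =====
-- def pyramidArt(x: str):
--     n = len(x)
--     rows = []
--     for i in range(n):
--         half1 = x[n - 1 - i: n]
--         half2 = x[n: n - i - 1: -1]
--         rows.append(".".join(half2 + half1).center(4 * n - 3, "."))
--     return "\n".join(rows + rows[-2::-1]) + "\n"
-- ===== Notes on version B (the rewrite author's own statement) =====
-- stated objective: simpler
-- what changed: B builds only the top half of the pyramid as a list of row strings, mirrors it (rows[-2::-1]) to get the bottom half instead of recomputing each bottom row with its own slices, and assembles the result with a single newline-join; A runs two independent loops that re-slice the string and concatenate onto an accumulator.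
import Mathlib
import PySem

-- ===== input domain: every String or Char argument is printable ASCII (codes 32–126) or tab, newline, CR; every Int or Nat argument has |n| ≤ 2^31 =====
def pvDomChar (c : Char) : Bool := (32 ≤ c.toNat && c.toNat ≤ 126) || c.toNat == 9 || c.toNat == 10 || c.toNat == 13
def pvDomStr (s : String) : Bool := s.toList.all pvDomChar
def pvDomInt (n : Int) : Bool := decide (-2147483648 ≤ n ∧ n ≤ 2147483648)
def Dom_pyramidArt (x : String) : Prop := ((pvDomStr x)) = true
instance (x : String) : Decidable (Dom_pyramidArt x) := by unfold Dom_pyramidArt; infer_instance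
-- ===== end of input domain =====

-- B builds only the top half and mirrors the stored rows for the bottom half (rows[-2::-1] + one
-- '\n'.join) instead of A's second slice-and-concatenate loop; same return value, both total.

-- hand port of str.center(w, f) (CPython rule: left = marg//2 + (marg & w & 1)); exact
def pvCenter (s : List Char) (w : Int) (f : Char) : List Char :=
  let marg : Int := w - s.length
  if marg ≤ 0 then s
  else
    let left : Int := PySem.Int.floordiv marg 2 + PySem.Int.band (PySem.Int.band marg w) 1
    List.replicate left.toNat f ++ s ++ List.replicate (marg - left).toNat f

-- '.'.join(half).center(4*n-3, '.') — shared tail of a row computation (identical in both sources)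
def pvDress (n : Int) (half : List Char) : List Char :=
  pvCenter (PySem.Chars.join ['.'] (half.map (fun c => [c]))) (4 * n - 3) '.'

-- half2 + half1 of A's FIRST loop (also the row body of B's single loop): x[n:n-i-1:-1] + x[n-1-i:n]
def pvRowTop (s : List Char) (n i : Int) : List Char :=
  pvDress n ((PySem.List.slice? s (some n) (some (n - i - 1)) (-1)).getD []
             ++ PySem.List.slice s (some (n - 1 - i)) (some n))

-- half2 + half1 of A's SECOND loop: x[n-1:i+1:-1] + x[i+1:n]
def pvRowBot (s : List Char) (n i : Int) : List Char :=
  pvDress n ((PySem.List.slice? s (some (n - 1)) (some (i + 1)) (-1)).getD []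
             ++ PySem.List.slice s (some (i + 1)) (some n))

-- ===== PORT A =====
def pyramidArt (x : String) : String :=
  let s := x.toList
  let n : Int := s.length
  let st : List Char :=
    (PySem.List.pyRange 0 n).foldl
      (fun st i => st ++ pvRowTop s n i ++ (if i ≠ n - 1 then ['\n'] else [])) []
  let st := st ++ ['\n']
  let st :=
    (PySem.List.pyRange 0 (n - 1)).foldl
      (fun st i => st ++ pvRowBot s n i ++ (if i ≠ n - 1 then ['\n'] else [])) st
  String.mk st

-- ===== PORT B =====
def pyramidArt_alt (x : String) : String :=
  let s := x.toList
  let n : Int := s.length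
  let rows : List (List Char) :=
    (PySem.List.pyRange 0 n).foldl (fun acc i => acc ++ [pvRowTop s n i]) []
  let full := rows ++ (PySem.List.slice? rows (some (-2)) none (-1)).getD []
  String.mk (PySem.Chars.join ['\n'] full ++ ['\n'])

-- ===== PRECONDITION & SPEC =====
def Spec_pyramidArt (x : String) (out : String) : Prop := out = pyramidArt_alt x
instance (x : String) (out : String) : Decidable (Spec_pyramidArt x out) := by unfold Spec_pyramidArt; infer_instance

-- ===== CLAIM (what is proved, stated in full; the proofs are below) =====
def Claim_equal_pyramidArt : Prop := ∀ (x : String), Dom_pyramidArt x → Spec_pyramidArt x (pyramidArt x)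

-- ===== LEMMAS AND PROOFS =====

-- join sep (y :: ts) laid out flat
lemma pv_join_cons (sep y : List Char) (ts : List (List Char)) :
    PySem.Chars.join sep (y :: ts) = y ++ ts.flatMap (fun t => sep ++ t) := by
  induction ts generalizing y with
  | nil => simp [PySem.Chars.join, List.intercalate]
  | cons t ts ih =>
      rw [PySem.Chars.join_cons_cons, ih t]
      simp [List.append_assoc]

-- join sep (ys ++ [a]) laid out flat
lemma pv_join_snoc (sep a : List Char) (ys : List (List Char)) :
    PySem.Chars.join sep (ys ++ [a]) = ys.flatMap (fun y => y ++ sep) ++ a := by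
  induction ys with
  | nil => simp [PySem.Chars.join, List.intercalate]
  | cons y ys ih =>
      cases hys : ys ++ [a] with
      | nil => simp at hys
      | cons z zs =>
          rw [List.cons_append, hys, PySem.Chars.join_cons_cons, ← hys, ih]
          simp [List.append_assoc]

-- moving the separator from the front of each block to its back
lemma pv_flatMap_shift (sep : List Char) (Z : List (List Char)) :
    Z.flatMap (fun z => sep ++ z) ++ sep = sep ++ Z.flatMap (fun z => z ++ sep) := by
  induction Z with
  | nil => simp
  | cons z Z ih =>
      simp only [List.flatMap_cons, List.append_assoc] at *
      rw [ih]

-- the glue step: join of (top ++ bottom) + '\n'  vs  (join top + '\n') followed by row+'\n' blocks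
lemma pv_join_full (R Z : List (List Char)) (hR : R ≠ []) :
    PySem.Chars.join ['\n'] (R ++ Z) ++ ['\n']
      = (PySem.Chars.join ['\n'] R ++ ['\n']) ++ Z.flatMap (fun z => z ++ ['\n']) := by
  obtain ⟨y, ys, rfl⟩ : ∃ y ys, R = y :: ys := by
    cases R with
    | nil => exact absurd rfl hR
    | cons y ys => exact ⟨y, ys, rfl⟩
  rw [List.cons_append, pv_join_cons, pv_join_cons, List.flatMap_append]
  simp only [List.append_assoc]
  rw [pv_flatMap_shift]

-- index mirroring: map over range backwards is the reverse
lemma pv_map_range_rev {β : Type} (f : Nat → β) (k : Nat) :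
    (List.range k).map (fun j => f (k - 1 - j)) = ((List.range k).map f).reverse := by
  apply List.ext_getElem
  · simp
  · intro i h1 h2
    simp only [List.getElem_map, List.getElem_range, List.getElem_reverse]
    simp only [List.length_map, List.length_range] at h2 ⊢

-- A's first loop produces exactly '\n'.join of the top rows
lemma pv_fold_top (F : Int → List Char) (m : Nat) :
    (PySem.List.pyRange 0 (m : Int)).foldl
        (fun st i => st ++ F i ++ (if i ≠ (m : Int) - 1 then ['\n'] else [])) []
      = PySem.Chars.join ['\n'] ((PySem.List.pyRange 0 (m : Int)).map F) := by
  rw [PySem.List.pyRange_zero_natCast, List.foldl_map, List.map_map]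
  cases m with
  | zero => simp [PySem.Chars.join, List.intercalate]
  | succ k =>
      rw [List.range_succ, List.foldl_append, List.map_append]
      simp only [List.map_cons, List.map_nil]
      rw [pv_join_snoc]
      have hbody : (List.range k).foldl
          (fun st (j : Nat) => st ++ F ↑j ++ (if (j : Int) ≠ ((k + 1 : Nat) : Int) - 1 then ['\n'] else [])) []
          = (List.range k).flatMap (fun j : Nat => F ↑j ++ ['\n']) := by
        rw [PySem.List.foldl_congr_mem (List.range k) _
              (fun st (j : Nat) => st ++ (F ↑j ++ ['\n'])) []
              (by intro acc j hj
                  rw [List.mem_range] at hj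
                  rw [if_pos (by push_cast; omega), List.append_assoc])]
        rw [PySem.List.foldl_append_eq_flatMap (fun j : Nat => F ↑j ++ ['\n']) (List.range k) [],
            List.nil_append]
      simp only [List.foldl_cons, List.foldl_nil, hbody]
      rw [if_neg (by push_cast; omega)]
      simp [List.flatMap_map, Function.comp_def]

-- slice?/getElem? helper for l[-2::-1]
lemma pv_rev_take {α : Type} (l : List α) : ∀ (m : Nat), m ≤ l.length →
    List.filterMap (fun x : Nat => l[((m : Int) - 1 - (x : Int)).toNat]?) (List.range m)
      = (l.take m).reverse := by
  intro m
  induction m with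
  | zero => simp
  | succ m ih =>
      intro h
      have hm : m < l.length := by omega
      rw [List.range_succ_eq_map, List.filterMap_cons, List.filterMap_map]
      have h0 : ((((m+1 : Nat)) : Int) - 1 - ((0 : Nat) : Int)).toNat = m := by push_cast; omega
      rw [h0, List.getElem?_eq_getElem hm]
      have hcomp : ((fun x : Nat => l[(((m+1 : Nat) : Int) - 1 - ((x : Nat) : Int)).toNat]?) ∘ Nat.succ)
          = fun x : Nat => l[((m : Int) - 1 - ((x : Nat) : Int)).toNat]? := by
        funext x
        simp only [Function.comp_def]
        congr 1
        push_cast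
        omega
      rw [hcomp, ih (by omega)]
      have htake : List.take (m+1) l = List.take m l ++ [l[m]] := by
        rw [List.take_add_one, List.getElem?_eq_getElem hm]
        simp
      rw [htake, List.reverse_append]
      simp

-- l[-2::-1] = reverse (dropLast l)
lemma pv_slice_neg2_rev {α : Type} (l : List α) :
    (PySem.List.slice? l (some (-2)) none (-1)).getD [] = l.dropLast.reverse := by
  simp only [PySem.List.slice?, PySem.List.sliceIndices]
  norm_num
  rcases Nat.lt_or_ge 1 l.length with h | h
  · have hcnt : ((max (-2 + (l.length : Int)) (-1)) + 1).toNat = l.length - 1 := by omega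
    rw [hcnt]
    have hfun : (fun x : Nat => l[(max (-2 + (l.length:Int)) (-1) + -(x:Int)).toNat]?)
        = fun x : Nat => l[(((l.length - 1 : Nat) : Int) - 1 - (x:Int)).toNat]? := by
      funext x; congr 1; omega
    rw [if_pos h, hfun, pv_rev_take l (l.length - 1) (by omega), List.dropLast_eq_take]
  · match l, h with
    | [], _ => simp
    | [a], _ => simp

-- starting a negative-step slice at len is the same as starting at len-1 (both clamp)
lemma pv_slice_start_len {α : Type} (l : List α) (b : Option Int) :
    PySem.List.slice? l (some (l.length : Int)) b (-1)
      = PySem.List.slice? l (some ((l.length : Int) - 1)) b (-1) := by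
  have h : PySem.List.sliceIndices l.length (some (l.length : Int)) b (-1)
      = PySem.List.sliceIndices l.length (some ((l.length : Int) - 1)) b (-1) := by
    simp only [PySem.List.sliceIndices]
    split_ifs <;> simp_all <;> try omega
  simp only [PySem.List.slice?, h]

-- a bottom row of A is the mirrored top row
lemma pv_row_mirror (s : List Char) (j : Int) :
    pvRowBot s (s.length : Int) j
      = pvRowTop s (s.length : Int) ((s.length : Int) - 2 - j) := by
  unfold pvRowBot pvRowTop
  rw [pv_slice_start_len]
  have e1 : (s.length : Int) - 1 - ((s.length : Int) - 2 - j) = j + 1 := by ring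
  have e2 : (s.length : Int) - ((s.length : Int) - 2 - j) - 1 = j + 1 := by ring
  rw [e1, e2]

-- assembling the pyramid from abstract row functions F (top) and G (bottom), G mirroring F
lemma pv_assemble (F G : Int → List Char) (k : Nat)
    (hmir : ∀ j : Int, G j = F (((k+1 : Nat) : Int) - 2 - j)) :
    (PySem.List.pyRange 0 (((k+1 : Nat) : Int) - 1)).foldl
        (fun st i => st ++ G i ++ (if i ≠ ((k+1 : Nat) : Int) - 1 then ['\n'] else []))
        (((PySem.List.pyRange 0 ((k+1 : Nat) : Int)).foldl
            (fun st i => st ++ F i ++ (if i ≠ ((k+1 : Nat) : Int) - 1 then ['\n'] else [])) []) ++ ['\n'])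
      = PySem.Chars.join ['\n']
          (((PySem.List.pyRange 0 ((k+1 : Nat) : Int)).map F)
            ++ ((PySem.List.pyRange 0 ((k+1 : Nat) : Int)).map F).dropLast.reverse) ++ ['\n'] := by
  have hcast : ((k+1 : Nat) : Int) - 1 = ((k : Nat) : Int) := by push_cast; ring
  have hRrange : (PySem.List.pyRange 0 ((k+1 : Nat) : Int)).map F
      = (List.range (k+1)).map (fun j : Nat => F ↑j) := by
    rw [PySem.List.pyRange_zero_natCast, List.map_map]
    simp [Function.comp_def]
  have hRne : (PySem.List.pyRange 0 ((k+1 : Nat) : Int)).map F ≠ [] := by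
    rw [hRrange]; simp
  have hdrop : ((PySem.List.pyRange 0 ((k+1 : Nat) : Int)).map F).dropLast
      = (List.range k).map (fun j : Nat => F ↑j) := by
    rw [hRrange, List.range_succ, List.map_append]
    simp
  rw [pv_join_full _ _ hRne, hdrop]
  rw [pv_fold_top F (k+1)]
  rw [hcast]
  rw [PySem.List.foldl_congr_mem (PySem.List.pyRange 0 ((k : Nat) : Int)) _
        (fun st i => st ++ (G i ++ ['\n']))
        (PySem.Chars.join ['\n'] ((PySem.List.pyRange 0 ((k+1 : Nat) : Int)).map F) ++ ['\n'])
        (by intro acc i hi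
            rw [PySem.List.mem_pyRange_one] at hi
            rw [if_pos (by omega), List.append_assoc]),
      PySem.List.foldl_append_eq_flatMap (fun i => G i ++ ['\n'])
        (PySem.List.pyRange 0 ((k : Nat) : Int)) _]
  congr 1
  rw [PySem.List.pyRange_zero_natCast]
  have hmap : (List.range k).map (fun j : Nat => G ↑j)
      = (List.range k).map (fun j : Nat => F ↑(k - 1 - j)) := by
    apply List.map_congr_left
    intro j hj
    rw [List.mem_range] at hj
    rw [hmir ↑j]
    congr 1
    push_cast
    omega
  calc ((List.range k).map (fun j : Nat => ((j : Nat) : Int))).flatMap (fun i => G i ++ ['\n'])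
      = (((List.range k).map (fun j : Nat => G ↑j)).map (fun r => r ++ ['\n'])).flatten := by
        rw [List.flatMap_def, List.map_map, List.map_map]
        rfl
    _ = (((List.range k).map (fun j : Nat => F ↑j)).reverse.map (fun r => r ++ ['\n'])).flatten := by
        rw [hmap, pv_map_range_rev (fun j : Nat => F ↑j) k]
    _ = ((List.range k).map (fun j : Nat => F ↑j)).reverse.flatMap (fun r => r ++ ['\n']) := by
        rw [List.flatMap_def]

-- the whole pyramid, list-level
lemma pv_main (s : List Char) :
    (let n : Int := s.length
     ((PySem.List.pyRange 0 (n - 1)).foldl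
        (fun st i => st ++ pvRowBot s n i ++ (if i ≠ n - 1 then ['\n'] else []))
        (((PySem.List.pyRange 0 n).foldl
            (fun st i => st ++ pvRowTop s n i ++ (if i ≠ n - 1 then ['\n'] else [])) []) ++ ['\n'])))
      = (let n : Int := s.length
         let rows := (PySem.List.pyRange 0 n).foldl (fun acc i => acc ++ [pvRowTop s n i]) []
         PySem.Chars.join ['\n'] (rows ++ (PySem.List.slice? rows (some (-2)) none (-1)).getD []) ++ ['\n']) := by
  cases hm : s.length with
  | zero =>
      norm_num
      simp [PySem.Chars.join, List.intercalate, PySem.List.slice?, PySem.List.sliceIndices]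
  | succ k =>
      dsimp only
      rw [PySem.List.foldl_append_singleton_eq_map, List.nil_append, pv_slice_neg2_rev]
      exact pv_assemble (fun i => pvRowTop s ((k+1 : Nat) : Int) i)
        (fun i => pvRowBot s ((k+1 : Nat) : Int) i) k
        (fun j => by have := pv_row_mirror s j; rwa [hm] at this)

-- ===== VERDICT (by name: the statement is the Claim_ definition above) =====
theorem pyramidArt_spec : Claim_equal_pyramidArt := by
  intro x _
  unfold Spec_pyramidArt pyramidArt pyramidArt_alt
  exact congrArg String.mk (pv_main x.toList)
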